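-- pv_equiv track=rewrite | github.com/77pixel/2N_sms_gateway | sms2ngateway.py | pdu_encode
-- ===== SOURCE A (Python) =====
-- def pdu_encode(tekst):
--     number   = 0
--     bitcount = 0
--     output   = ''
--     byte_array = bytearray.fromhex(tekst)
--     for x in byte_array:
--         number = number + (x << bitcount)
--         bitcount = bitcount + 1
--         output = output + '%c' % (number % 128)
--         number = number >> 7
--         if bitcount == 7:
--             output = output + '%c' % (number)
--             bitcount = 0
--             number = 0
--     return output
-- ===== SOURCE B (Python) =====
-- def pdu_encode(tekst):
--     byte_array = bytearray.fromhex(tekst)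
--     acc = int.from_bytes(byte_array, 'little')
--     count = (len(byte_array) * 8) // 7
--     return ''.join(chr((acc >> (7 * j)) & 127) for j in range(count))
-- ===== Notes on version B (the rewrite author's own statement) =====
-- stated objective: alternative
-- what changed: B replaces A's per-byte bit-buffer/carry loop (number/bitcount state with a reset every 7 bytes) by building one little-endian integer over all bytes and extracting (8*len)//7 consecutive 7-bit windows from it; it trades the constant-size per-byte state for big-integer shifts.
import Mathlib
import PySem

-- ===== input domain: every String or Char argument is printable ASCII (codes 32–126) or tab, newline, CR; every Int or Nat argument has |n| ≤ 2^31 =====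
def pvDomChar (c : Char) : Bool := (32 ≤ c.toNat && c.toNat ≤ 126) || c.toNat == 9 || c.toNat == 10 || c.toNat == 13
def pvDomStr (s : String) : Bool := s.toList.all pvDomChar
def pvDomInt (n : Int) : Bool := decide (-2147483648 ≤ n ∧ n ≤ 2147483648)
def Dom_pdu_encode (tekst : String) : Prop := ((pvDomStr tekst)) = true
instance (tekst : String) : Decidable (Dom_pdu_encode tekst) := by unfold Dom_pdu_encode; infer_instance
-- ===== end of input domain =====

-- B packs the bytes into one little-endian integer and slices out the 7-bit septets,
-- replacing A's per-byte carry loop; no speed claim.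

-- Shared model of Python's `bytearray.fromhex` (both Pythons call the same builtin):
-- skips ASCII whitespace between byte pairs, requires two contiguous hex digits per byte,
-- returns none exactly where Python raises ValueError.
def pvIsSpace (c : Char) : Bool :=
  c.toNat == 32 || c.toNat == 9 || c.toNat == 10 || c.toNat == 11 || c.toNat == 12 || c.toNat == 13

def pvHexVal? (c : Char) : Option Nat :=
  if 48 ≤ c.toNat ∧ c.toNat ≤ 57 then some (c.toNat - 48)
  else if 97 ≤ c.toNat ∧ c.toNat ≤ 102 then some (c.toNat - 87)
  else if 65 ≤ c.toNat ∧ c.toNat ≤ 70 then some (c.toNat - 55)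
  else none

def pvFromHex : List Char → Option (List Nat)
  | [] => some []
  | c :: rest =>
    if pvIsSpace c then pvFromHex rest
    else
      match rest with
      | [] => none
      | d :: rest' =>
        match pvHexVal? c, pvHexVal? d with
        | some h, some l => (pvFromHex rest').map (fun bs => (16 * h + l) :: bs)
        | _, _ => none

-- ===== PORT A =====
-- A's loop: state (number, bitcount), one output septet per byte, an extra one and a reset
-- every 7th byte; '<<'/'>>' are Nat.shiftLeft/shiftRight, '%c' collects the char code.
def pduLoopA : List Nat → Nat → Nat → List Nat
  | [], _, _ => []
  | x :: rest, number, bitcount =>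
    let n1 := number + (x <<< bitcount)
    if bitcount + 1 = 7 then
      n1 % 128 :: (n1 >>> 7) :: pduLoopA rest 0 0
    else
      n1 % 128 :: pduLoopA rest (n1 >>> 7) (bitcount + 1)

def pdu_encode (tekst : String) : String :=
  match pvFromHex tekst.toList with
  | some byte_array => String.mk ((pduLoopA byte_array 0 0).map Char.ofNat)
  | none => ""   -- Python raises ValueError here; excluded by Pre_

-- ===== PORT B =====
-- int.from_bytes(byte_array, 'little')
def pvLeVal : List Nat → Nat
  | [] => 0
  | b :: rest => b + 256 * pvLeVal rest

def pdu_encode_alt (tekst : String) : String :=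
  match pvFromHex tekst.toList with
  | some byte_array =>
    let acc := pvLeVal byte_array
    let count := 8 * byte_array.length / 7
    String.mk ((List.range count).map (fun j => Char.ofNat ((acc >>> (7 * j)) &&& 127)))
  | none => ""   -- Python raises ValueError here; excluded by Pre_

-- ===== PRECONDITION & SPEC =====
-- Pre_ excludes exactly the strings on which bytearray.fromhex raises ValueError: valid input means
-- every maximal whitespace-free run of characters has even length and consists of hex digits only.
def Pre_pdu_encode (tekst : String) : Prop :=
  ((tekst.toList.splitOnP (fun c => pvIsSpace c)).all
    (fun run => run.length % 2 == 0 && run.all (fun c => (pvHexVal? c).isSome))) = true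
instance (tekst : String) : Decidable (Pre_pdu_encode tekst) := by unfold Pre_pdu_encode; infer_instance
def pvWitness_pdu_encode : String := "0a"

def Spec_pdu_encode (tekst : String) (out : String) : Prop := out = pdu_encode_alt tekst
instance (tekst : String) (out : String) : Decidable (Spec_pdu_encode tekst out) := by unfold Spec_pdu_encode; infer_instance

-- ===== CLAIM (what is proved, stated in full; the proofs are below) =====
def Claim_equal_pdu_encode : Prop := ∀ (tekst : String), Dom_pdu_encode tekst → Pre_pdu_encode tekst → Spec_pdu_encode tekst (pdu_encode tekst)

-- ===== LEMMAS AND PROOFS =====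

-- every byte produced by pvFromHex is < 256
theorem pvHexVal?_lt {c : Char} {h : Nat} (hh : pvHexVal? c = some h) : h < 16 := by
  unfold pvHexVal? at hh
  split_ifs at hh <;> simp_all <;> omega

theorem pvFromHex_lt : ∀ (s : List Char) (bs : List Nat), pvFromHex s = some bs → ∀ b ∈ bs, b < 256
  | [], bs, h => by
    have h' : (some [] : Option (List Nat)) = some bs := h
    simp [← Option.some_inj.mp h']
  | c :: rest, bs, h => by
    rw [pvFromHex.eq_def] at h
    dsimp only at h
    by_cases hws : pvIsSpace c = true
    · rw [if_pos hws] at h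
      exact pvFromHex_lt rest bs h
    · rw [if_neg hws] at h
      cases rest with
      | nil => simp at h
      | cons d rest' =>
        dsimp only at h
        cases hvh : pvHexVal? c with
        | none => rw [hvh] at h; simp at h
        | some hh =>
          cases hvl : pvHexVal? d with
          | none => rw [hvh, hvl] at h; simp at h
          | some ll =>
            rw [hvh, hvl] at h
            dsimp only at h
            rcases Option.map_eq_some_iff.mp h with ⟨bs', hbs', rfl⟩
            intro b hb
            rcases List.mem_cons.mp hb with rfl | hb
            · have h1 := pvHexVal?_lt hvh
              have h2 := pvHexVal?_lt hvl
              omega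
            · exact pvFromHex_lt rest' bs' hbs' b hb
termination_by s _ _ => s.length
decreasing_by all_goals simp_all

-- (a + b * 2^(k+m)) / 2^k = a / 2^k + b * 2^m
theorem pv_div_pow_add (a b k m : Nat) : (a + b * 2 ^ (k + m)) / 2 ^ k = a / 2 ^ k + b * 2 ^ m := by
  rw [pow_add, show b * (2 ^ k * 2 ^ m) = b * 2 ^ m * 2 ^ k by ring]
  exact Nat.add_mul_div_right a _ (Nat.two_pow_pos k)

-- adding b * 2^(7+m) does not change the value mod 128
theorem pv_mod128_add (a b m : Nat) : (a + b * 2 ^ (7 + m)) % 128 = a % 128 := by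
  rw [pow_add, show b * (2 ^ 7 * 2 ^ m) = b * 2 ^ m * 128 by norm_num; ring]
  exact Nat.add_mul_mod_self_right a _ 128

-- Pre_ (even all-hex whitespace-separated runs) implies that pvFromHex succeeds
theorem pvRunsOk_isSome : ∀ (s : List Char),
    (∀ run ∈ s.splitOnP (fun c => pvIsSpace c),
      run.length % 2 = 0 ∧ ∀ c ∈ run, (pvHexVal? c).isSome = true) →
    (pvFromHex s).isSome = true
  | [], _ => rfl
  | c :: rest, h => by
    rw [pvFromHex.eq_def]
    dsimp only
    by_cases hws : pvIsSpace c = true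
    · rw [if_pos hws]
      apply pvRunsOk_isSome rest
      intro run hrun
      apply h
      rw [List.splitOnP_cons, if_pos hws]
      exact List.mem_cons_of_mem _ hrun
    · rw [if_neg hws]
      obtain ⟨r, rs, hsp⟩ : ∃ r rs, rest.splitOnP (fun c => pvIsSpace c) = r :: rs := by
        rcases hrest : rest.splitOnP (fun c => pvIsSpace c) with _ | ⟨r, rs⟩
        · exact absurd hrest (List.splitOnP_ne_nil _ _)
        · exact ⟨r, rs, rfl⟩
      have hrun0 := h (c :: r) (by
        rw [List.splitOnP_cons, if_neg hws, hsp]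
        simp [List.modifyHead])
      obtain ⟨heven, hhex⟩ := hrun0
      rcases r with _ | ⟨d, r'⟩
      · simp at heven
      · -- the first run continues: rest must start with the non-space hex digit d
        cases rest with
        | nil => rw [List.splitOnP_nil] at hsp; simp at hsp
        | cons e rest'' =>
          rw [List.splitOnP_cons] at hsp
          by_cases hwe : pvIsSpace e = true
          · rw [if_pos hwe] at hsp
            simp at hsp
          · rw [if_neg hwe] at hsp
            obtain ⟨r0, rs0, hsp2⟩ :
                ∃ r0 rs0, rest''.splitOnP (fun c => pvIsSpace c) = r0 :: rs0 := by
              rcases hrest : rest''.splitOnP (fun c => pvIsSpace c) with _ | ⟨r0, rs0⟩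
              · exact absurd hrest (List.splitOnP_ne_nil _ _)
              · exact ⟨r0, rs0, rfl⟩
            rw [hsp2] at hsp
            simp only [List.modifyHead, List.cons.injEq] at hsp
            obtain ⟨⟨rfl, rfl⟩, rfl⟩ := hsp
            have hc := hhex c (by simp)
            have hd := hhex e (by simp)
            rcases Option.isSome_iff_exists.mp hc with ⟨hcv, hceq⟩
            rcases Option.isSome_iff_exists.mp hd with ⟨hdv, hdeq⟩
            dsimp only
            rw [hceq, hdeq]
            dsimp only
            rw [Option.isSome_map]
            apply pvRunsOk_isSome rest''
            intro run hrun
            rw [hsp2] at hrun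
            rcases List.mem_cons.mp hrun with rfl | hrun
            · refine ⟨by simp only [List.length_cons] at heven; omega,
                fun a ha => hhex a (by simp [ha])⟩
            · apply h
              rw [List.splitOnP_cons, if_neg hws, List.splitOnP_cons, if_neg hwe, hsp2]
              simp only [List.modifyHead]
              exact List.mem_cons_of_mem _ hrun
termination_by s => s.length
decreasing_by all_goals simp_all

-- splitting one or two septets off the front of a window range
theorem septet_range_one (N b k : Nat) :
    (List.range (k + 1)).map (fun j => N / 2 ^ (7 * (b + j)) % 128) =
      N / 2 ^ (7 * b) % 128 :: (List.range k).map (fun j => N / 2 ^ (7 * (b + 1 + j)) % 128) := by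
  rw [List.range_succ_eq_map, List.map_cons, List.map_map]
  refine congrArg₂ _ (by norm_num) (List.map_congr_left fun j _ => ?_)
  simp only [Function.comp_apply, Nat.succ_eq_add_one]
  ring_nf

theorem septet_range_two (N b k : Nat) :
    (List.range (k + 2)).map (fun j => N / 2 ^ (7 * (b + j)) % 128) =
      N / 2 ^ (7 * b) % 128 :: N / 2 ^ (7 * (b + 1)) % 128 ::
        (List.range k).map (fun j => N / 2 ^ (7 * (b + 2 + j)) % 128) := by
  rw [septet_range_one, septet_range_one]

-- main invariant: with bitcount = i < 7 and number = V >> 7i for the value V < 2^(8i) of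
-- the bytes already consumed, A's loop emits exactly B's septet windows
theorem pduLoopA_eq : ∀ (L : List Nat), (∀ b ∈ L, b < 256) → ∀ (i V : Nat), i < 7 → V < 2 ^ (8 * i) →
    pduLoopA L (V / 2 ^ (7 * i)) i =
      (List.range (8 * (i + L.length) / 7 - i)).map
        (fun j => (V + pvLeVal L * 2 ^ (8 * i)) / 2 ^ (7 * (i + j)) % 128) := by
  intro L
  induction L with
  | nil =>
    intro _ i V hi _
    simp [pduLoopA, show 8 * i / 7 - i = 0 by omega]
  | cons x rest ih =>
    intro hlt i V hi hV
    have hx : x < 256 := hlt x (by simp)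
    have hrest : ∀ b ∈ rest, b < 256 := fun b hb => hlt b (by simp [hb])
    -- W = value of the consumed bytes including x
    set W := V + x * 2 ^ (8 * i) with hWdef
    have hW : W < 2 ^ (8 * (i + 1)) := by
      have h1 : W < 2 ^ (8 * i) + x * 2 ^ (8 * i) := Nat.add_lt_add_right hV _
      have h2 : 2 ^ (8 * i) + x * 2 ^ (8 * i) = (1 + x) * 2 ^ (8 * i) := by ring
      have h3 : (1 + x) * 2 ^ (8 * i) ≤ 256 * 2 ^ (8 * i) :=
        Nat.mul_le_mul_right _ (by omega)
      have h4 : 256 * 2 ^ (8 * i) = 2 ^ (8 * (i + 1)) := by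
        rw [show 8 * (i + 1) = 8 * i + 8 by ring, pow_add]; ring
      omega
    -- the RHS numerator in terms of W
    have hnum : V + pvLeVal (x :: rest) * 2 ^ (8 * i) = W + pvLeVal rest * 2 ^ (8 * (i + 1)) := by
      simp only [pvLeVal, hWdef]
      rw [show 8 * (i + 1) = 8 * i + 8 by ring, pow_add]
      ring
    -- n1 = W >> 7i
    have hn1 : V / 2 ^ (7 * i) + (x <<< i) = W / 2 ^ (7 * i) := by
      rw [Nat.shiftLeft_eq, hWdef, show 8 * i = 7 * i + i by ring, pv_div_pow_add]
    -- n1 >> 7 = W >> 7(i+1)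
    have hn2 : (W / 2 ^ (7 * i)) >>> 7 = W / 2 ^ (7 * (i + 1)) := by
      rw [Nat.shiftRight_eq_div_pow, Nat.div_div_eq_div_mul, ← pow_add,
        show 7 * i + 7 = 7 * (i + 1) by ring]
    -- head septet
    have hhead : W / 2 ^ (7 * i) % 128 =
        (W + pvLeVal rest * 2 ^ (8 * (i + 1))) / 2 ^ (7 * i) % 128 := by
      rw [show 8 * (i + 1) = 7 * i + (i + 8) by ring, pv_div_pow_add,
        show i + 8 = 7 + (i + 1) by ring, pv_mod128_add]
    by_cases h7 : i + 1 = 7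
    · -- i = 6: the block closes, an extra septet is emitted and the state resets
      have hi6 : i = 6 := by omega
      subst hi6
      have hcnt : 8 * (6 + (x :: rest).length) / 7 - 6 = 8 * rest.length / 7 + 2 := by
        simp only [List.length_cons]; omega
      rw [pduLoopA]
      simp only [hn1, hn2, hcnt, hnum]
      rw [septet_range_two]
      have hW56 : W < 2 ^ 56 := by norm_num at hW ⊢; omega
      refine List.cons_eq_cons.mpr ⟨?_, List.cons_eq_cons.mpr ⟨?_, ?_⟩⟩
      · exact hhead
      · -- second septet of the block: n1 >>> 7 itself (it is < 128)
        have hq : W / 2 ^ 49 < 128 := by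
          apply Nat.div_lt_of_lt_mul
          norm_num at hW56 ⊢
          omega
        rw [show 7 * (6 + 1) = 49 by norm_num, show 8 * (6 + 1) = 49 + 7 by norm_num,
          pv_div_pow_add, show (2 : Nat) ^ 7 = 128 by norm_num, Nat.add_mul_mod_self_right,
          Nat.mod_eq_of_lt hq]
      · -- tail: the remaining bytes restart a fresh block
        have hIH := ih hrest 0 0 (by norm_num) (by norm_num)
        simp only [pow_zero, Nat.div_one, mul_one, Nat.mul_zero, Nat.sub_zero,
          zero_add] at hIH
        rw [hIH]
        apply List.map_congr_left
        intro j _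
        rw [show 8 * (6 + 1) = 56 by norm_num,
          show 7 * (6 + 2 + j) = 56 + 7 * j by ring, pow_add,
          ← Nat.div_div_eq_div_mul,
          Nat.add_mul_div_right _ _ (Nat.two_pow_pos 56),
          Nat.div_eq_of_lt hW56, Nat.zero_add]
    · -- i + 1 < 7: continue inside the current block
      have hi1 : i + 1 < 7 := by omega
      have hcnt : 8 * (i + (x :: rest).length) / 7 - i =
          (8 * (i + 1 + rest.length) / 7 - (i + 1)) + 1 := by
        simp only [List.length_cons]; omega
      rw [pduLoopA]
      simp only [hn1, if_neg h7, hn2, hcnt, hnum]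
      rw [septet_range_one]
      refine List.cons_eq_cons.mpr ⟨hhead, ?_⟩
      exact ih hrest (i + 1) W hi1 hW

-- ===== VERDICT (by name: the statement is the Claim_ definition above) =====
theorem pdu_encode_spec : Claim_equal_pdu_encode := by
  intro tekst _ hpre
  unfold Spec_pdu_encode pdu_encode pdu_encode_alt
  unfold Pre_pdu_encode at hpre
  have hpre' : ∀ run ∈ tekst.toList.splitOnP (fun c => pvIsSpace c),
      run.length % 2 = 0 ∧ ∀ c ∈ run, (pvHexVal? c).isSome = true := by
    intro run hrun
    have h1 := List.all_eq_true.mp hpre run hrun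
    rw [Bool.and_eq_true, beq_iff_eq, List.all_eq_true] at h1
    exact ⟨h1.1, h1.2⟩
  have hsome := pvRunsOk_isSome tekst.toList hpre' 
  rcases Option.isSome_iff_exists.mp hsome with ⟨bytes, hbytes⟩
  rw [hbytes]
  dsimp only
  have hlt := pvFromHex_lt _ _ hbytes
  have h := pduLoopA_eq bytes hlt 0 0 (by norm_num) (by norm_num)
  simp only [Nat.mul_zero, pow_zero, Nat.div_one, mul_one, zero_add, Nat.sub_zero] at h
  rw [h, List.map_map]
  congr 1
  apply List.map_congr_left
  intro j _
  simp only [Function.comp_apply]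
  congr 1
  rw [Nat.shiftRight_eq_div_pow]
  exact (Nat.and_two_pow_sub_one_eq_mod _ 7).symm
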